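-- pv_equiv track=rewrite | github.com/immasmiley/test | SphereOS_Independent/sphereos_permanent_server.py | generate_specific_endpoints
-- ===== SOURCE A (Python) =====
-- from typing import Optional, Dict, Any, List, Union
--
-- def generate_specific_endpoints(pattern_name: str, pattern_path: str, method: str) -> List[Dict]:
--     """Generate specific endpoints from a pattern"""
--     endpoints = []
--
--     if pattern_name == 'health':
--         endpoints.append({
--             'key': f"{method}:/api/health",
--             'path': '/api/health',
--             'method': method,
--             'description': 'System health status'
--         })
--
--     elif pattern_name == 'metrics':
--         for metric_type in ['real-time', 'daily', 'weekly', 'monthly']: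
--             endpoints.append({
--                 'key': f"{method}:/api/metrics/{metric_type}",
--                 'path': f'/api/metrics/{metric_type}',
--                 'method': method,
--                 'description': f'{metric_type.title()} system metrics'
--             })
--
--     elif pattern_name == 'sphere':
--         for action in ['get', 'store', 'delete', 'update', 'search']:
--             endpoints.append({
--                 'key': f"{method}:/api/sphere/{action}/{{identifier}}",
--                 'path': f'/api/sphere/{action}/{{identifier}}',
--                 'method': method,
--                 'description': f'Sphere {action} operation'
--             })
--
--     elif pattern_name == 'value_leakage':
--         for action in ['scan', 'detect', 'analyze', 'report']:
--             endpoints.append({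
--                 'key': f"{method}:/api/value-leakage/{action}",
--                 'path': f'/api/value-leakage/{action}',
--                 'method': method,
--                 'description': f'Value leakage {action}'
--             })
--
--     elif pattern_name == 'opportunities':
--         for opp_type in ['professional', 'economic', 'social', 'knowledge', 'geographic']:
--             endpoints.append({
--                 'key': f"{method}:/api/opportunities/{opp_type}",
--                 'path': f'/api/opportunities/{opp_type}',
--                 'method': method,
--                 'description': f'{opp_type.title()} opportunities'
--             })
--
--     elif pattern_name == 'commercial':
--         for action in ['opportunities', 'transactions', 'matches', 'analysis']:
--             endpoints.append({
--                 'key': f"{method}:/api/commercial/{action}",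
--                 'path': f'/api/commercial/{action}',
--                 'method': method,
--                 'description': f'Commercial {action}'
--             })
--
--     return endpoints
-- ===== SOURCE B (Python) =====
-- # Table-driven rewrite: one (path, description) table keyed by pattern name,
-- # one uniform comprehension instead of a six-branch if/elif chain.
--
-- _ENDPOINT_TABLE = {
--     'health': [('/api/health', 'System health status')],
--     'metrics': [
--         ('/api/metrics/real-time', 'Real-Time system metrics'),
--         ('/api/metrics/daily', 'Daily system metrics'),
--         ('/api/metrics/weekly', 'Weekly system metrics'),
--         ('/api/metrics/monthly', 'Monthly system metrics'),
--     ],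
--     'sphere': [
--         ('/api/sphere/get/{identifier}', 'Sphere get operation'),
--         ('/api/sphere/store/{identifier}', 'Sphere store operation'),
--         ('/api/sphere/delete/{identifier}', 'Sphere delete operation'),
--         ('/api/sphere/update/{identifier}', 'Sphere update operation'),
--         ('/api/sphere/search/{identifier}', 'Sphere search operation'),
--     ],
--     'value_leakage': [
--         ('/api/value-leakage/scan', 'Value leakage scan'),
--         ('/api/value-leakage/detect', 'Value leakage detect'),
--         ('/api/value-leakage/analyze', 'Value leakage analyze'),
--         ('/api/value-leakage/report', 'Value leakage report'),
--     ],
--     'opportunities': [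
--         ('/api/opportunities/professional', 'Professional opportunities'),
--         ('/api/opportunities/economic', 'Economic opportunities'),
--         ('/api/opportunities/social', 'Social opportunities'),
--         ('/api/opportunities/knowledge', 'Knowledge opportunities'),
--         ('/api/opportunities/geographic', 'Geographic opportunities'),
--     ],
--     'commercial': [
--         ('/api/commercial/opportunities', 'Commercial opportunities'),
--         ('/api/commercial/transactions', 'Commercial transactions'),
--         ('/api/commercial/matches', 'Commercial matches'),
--         ('/api/commercial/analysis', 'Commercial analysis'),
--     ],
-- }
--
--
-- def generate_specific_endpoints(pattern_name: str, pattern_path: str, method: str):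
--     return [
--         {
--             'key': f"{method}:{path}",
--             'path': path,
--             'method': method,
--             'description': desc,
--         }
--         for path, desc in _ENDPOINT_TABLE.get(pattern_name, [])
--     ]
-- ===== Notes on version B (the rewrite author's own statement) =====
-- stated objective: simpler
-- what changed: Replaced the six-branch if/elif chain (each with its own loop and f-string templates) by one literal (path, description) table keyed by pattern name plus a single uniform comprehension.
import Mathlib
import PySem

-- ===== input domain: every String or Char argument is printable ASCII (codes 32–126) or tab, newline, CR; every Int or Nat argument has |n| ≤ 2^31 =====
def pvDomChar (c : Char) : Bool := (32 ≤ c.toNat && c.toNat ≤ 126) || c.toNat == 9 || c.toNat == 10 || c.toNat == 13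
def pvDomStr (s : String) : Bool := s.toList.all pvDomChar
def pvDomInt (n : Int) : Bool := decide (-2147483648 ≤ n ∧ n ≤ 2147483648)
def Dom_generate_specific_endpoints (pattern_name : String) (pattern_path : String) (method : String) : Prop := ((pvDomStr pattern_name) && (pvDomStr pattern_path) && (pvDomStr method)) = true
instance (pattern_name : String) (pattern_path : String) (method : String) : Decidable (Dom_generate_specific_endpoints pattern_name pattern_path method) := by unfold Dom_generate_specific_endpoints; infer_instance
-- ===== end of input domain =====

-- B replaces A's six-branch if/elif chain by one literal table plus a single uniform map (objective: simpler).

-- ===== PORT A =====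
-- hand port of str.title() (PySem has none); exact for the ASCII strings it is applied to here
def pyTitleAux : List Char → Bool → List Char
  | [], _ => []
  | c :: cs, prevCased =>
    if PySem.Chars.isalpha c then
      (if prevCased then PySem.Chars.lowerChar c else PySem.Chars.upperChar c) :: pyTitleAux cs true
    else
      c :: pyTitleAux cs false

def pyTitle (s : String) : String := String.ofList (pyTitleAux s.toList false)

def generate_specific_endpoints (pattern_name : String) (pattern_path : String) (method : String) : List (List (String × String)) :=
  let endpoints : List (List (String × String)) := []
  if pattern_name == "health" then
    endpoints ++ [[("key", method ++ ":/api/health"), ("path", "/api/health"),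
                   ("method", method), ("description", "System health status")]]
  else if pattern_name == "metrics" then
    ["real-time", "daily", "weekly", "monthly"].foldl (fun acc metric_type =>
      acc ++ [[("key", method ++ ":/api/metrics/" ++ metric_type),
               ("path", "/api/metrics/" ++ metric_type),
               ("method", method),
               ("description", pyTitle metric_type ++ " system metrics")]]) endpoints
  else if pattern_name == "sphere" then
    ["get", "store", "delete", "update", "search"].foldl (fun acc action =>
      acc ++ [[("key", method ++ ":/api/sphere/" ++ action ++ "/{identifier}"),
               ("path", "/api/sphere/" ++ action ++ "/{identifier}"),
               ("method", method),
               ("description", "Sphere " ++ action ++ " operation")]]) endpoints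
  else if pattern_name == "value_leakage" then
    ["scan", "detect", "analyze", "report"].foldl (fun acc action =>
      acc ++ [[("key", method ++ ":/api/value-leakage/" ++ action),
               ("path", "/api/value-leakage/" ++ action),
               ("method", method),
               ("description", "Value leakage " ++ action)]]) endpoints
  else if pattern_name == "opportunities" then
    ["professional", "economic", "social", "knowledge", "geographic"].foldl (fun acc opp_type =>
      acc ++ [[("key", method ++ ":/api/opportunities/" ++ opp_type),
               ("path", "/api/opportunities/" ++ opp_type),
               ("method", method),
               ("description", pyTitle opp_type ++ " opportunities")]]) endpoints
  else if pattern_name == "commercial" then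
    ["opportunities", "transactions", "matches", "analysis"].foldl (fun acc action =>
      acc ++ [[("key", method ++ ":/api/commercial/" ++ action),
               ("path", "/api/commercial/" ++ action),
               ("method", method),
               ("description", "Commercial " ++ action)]]) endpoints
  else
    endpoints

-- ===== PORT B =====
def pvEndpointTable : PySem.Dict String (List (String × String)) :=
  PySem.Dict.mk
  [("health", [("/api/health", "System health status")]),
   ("metrics",
     [("/api/metrics/real-time", "Real-Time system metrics"),
      ("/api/metrics/daily", "Daily system metrics"),
      ("/api/metrics/weekly", "Weekly system metrics"),
      ("/api/metrics/monthly", "Monthly system metrics")]),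
   ("sphere",
     [("/api/sphere/get/{identifier}", "Sphere get operation"),
      ("/api/sphere/store/{identifier}", "Sphere store operation"),
      ("/api/sphere/delete/{identifier}", "Sphere delete operation"),
      ("/api/sphere/update/{identifier}", "Sphere update operation"),
      ("/api/sphere/search/{identifier}", "Sphere search operation")]),
   ("value_leakage",
     [("/api/value-leakage/scan", "Value leakage scan"),
      ("/api/value-leakage/detect", "Value leakage detect"),
      ("/api/value-leakage/analyze", "Value leakage analyze"),
      ("/api/value-leakage/report", "Value leakage report")]),
   ("opportunities",
     [("/api/opportunities/professional", "Professional opportunities"),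
      ("/api/opportunities/economic", "Economic opportunities"),
      ("/api/opportunities/social", "Social opportunities"),
      ("/api/opportunities/knowledge", "Knowledge opportunities"),
      ("/api/opportunities/geographic", "Geographic opportunities")]),
   ("commercial",
     [("/api/commercial/opportunities", "Commercial opportunities"),
      ("/api/commercial/transactions", "Commercial transactions"),
      ("/api/commercial/matches", "Commercial matches"),
      ("/api/commercial/analysis", "Commercial analysis")])]

def generate_specific_endpoints_alt (pattern_name : String) (pattern_path : String) (method : String) : List (List (String × String)) :=
  (PySem.Dict.getD pvEndpointTable pattern_name []).map (fun (pd : String × String) =>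
    [("key", method ++ (":" ++ pd.1)), ("path", pd.1), ("method", method), ("description", pd.2)])

-- ===== PRECONDITION & SPEC =====
def Spec_generate_specific_endpoints (pattern_name : String) (pattern_path : String) (method : String) (out : List (List (String × String))) : Prop := out = generate_specific_endpoints_alt pattern_name pattern_path method
instance (pattern_name : String) (pattern_path : String) (method : String) (out : List (List (String × String))) : Decidable (Spec_generate_specific_endpoints pattern_name pattern_path method out) := by unfold Spec_generate_specific_endpoints; infer_instance

-- ===== CLAIM (what is proved, stated in full; the proofs are below) =====
def Claim_equal_generate_specific_endpoints : Prop := ∀ (pattern_name : String) (pattern_path : String) (method : String), Dom_generate_specific_endpoints pattern_name pattern_path method → Spec_generate_specific_endpoints pattern_name pattern_path method (generate_specific_endpoints pattern_name pattern_path method)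

-- ===== LEMMAS AND PROOFS =====
theorem pyTitle_lit1 : pyTitle "real-time" = "Real-Time" := by decide
theorem pyTitle_lit2 : pyTitle "daily" = "Daily" := by decide
theorem pyTitle_lit3 : pyTitle "weekly" = "Weekly" := by decide
theorem pyTitle_lit4 : pyTitle "monthly" = "Monthly" := by decide
theorem pyTitle_lit5 : pyTitle "professional" = "Professional" := by decide
theorem pyTitle_lit6 : pyTitle "economic" = "Economic" := by decide
theorem pyTitle_lit7 : pyTitle "social" = "Social" := by decide
theorem pyTitle_lit8 : pyTitle "knowledge" = "Knowledge" := by decide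
theorem pyTitle_lit9 : pyTitle "geographic" = "Geographic" := by decide

-- ===== VERDICT (by name: the statement is the Claim_ definition above) =====
theorem generate_specific_endpoints_spec : Claim_equal_generate_specific_endpoints := by
  intro pn pp m _
  unfold Spec_generate_specific_endpoints generate_specific_endpoints generate_specific_endpoints_alt
  by_cases h1 : pn = "health"
  · subst h1; simp [pvEndpointTable, PySem.Dict.getD, PySem.Dict.get?]
  by_cases h2 : pn = "metrics"
  · subst h2
    simp [pvEndpointTable, PySem.Dict.getD, PySem.Dict.get?, String.append_assoc, pyTitle_lit1, pyTitle_lit2, pyTitle_lit3, pyTitle_lit4]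
  by_cases h3 : pn = "sphere"
  · subst h3; simp [pvEndpointTable, PySem.Dict.getD, PySem.Dict.get?, String.append_assoc]
  by_cases h4 : pn = "value_leakage"
  · subst h4; simp [pvEndpointTable, PySem.Dict.getD, PySem.Dict.get?, String.append_assoc]
  by_cases h5 : pn = "opportunities"
  · subst h5
    simp [pvEndpointTable, PySem.Dict.getD, PySem.Dict.get?, String.append_assoc, pyTitle_lit5, pyTitle_lit6, pyTitle_lit7, pyTitle_lit8, pyTitle_lit9]
  by_cases h6 : pn = "commercial"
  · subst h6; simp [pvEndpointTable, PySem.Dict.getD, PySem.Dict.get?, String.append_assoc]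
  have e1 : ("health" == pn) = false := beq_eq_false_iff_ne.mpr (Ne.symm h1)
  have e2 : ("metrics" == pn) = false := beq_eq_false_iff_ne.mpr (Ne.symm h2)
  have e3 : ("sphere" == pn) = false := beq_eq_false_iff_ne.mpr (Ne.symm h3)
  have e4 : ("value_leakage" == pn) = false := beq_eq_false_iff_ne.mpr (Ne.symm h4)
  have e5 : ("opportunities" == pn) = false := beq_eq_false_iff_ne.mpr (Ne.symm h5)
  have e6 : ("commercial" == pn) = false := beq_eq_false_iff_ne.mpr (Ne.symm h6)
  simp [pvEndpointTable, PySem.Dict.getD, PySem.Dict.get?, e1, e2, e3, e4, e5, e6, h1, h2, h3, h4, h5, h6]
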